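-- pv_equiv track=rewrite | github.com/skyfireitdiy/Jarvis | src/jarvis/jarvis_memory_organizer/memory_organizer.py | _find_overlapping_memories
-- ===== SOURCE A (Python) =====
-- from collections import defaultdict
-- from typing import Dict, List, Set, Any, Optional
--
-- def _find_overlapping_memories(
--     memories: List[Dict[str, Any]], min_overlap: int
-- ) -> Dict[int, List[Set[int]]]:
--     """
--     查找具有重叠标签的记忆组
--
--     返回：{重叠数量: [记忆索引集合列表]}
--     """
--     # 构建标签到记忆索引的映射
--     tag_to_memories = defaultdict(set)
--     for i, memory in enumerate(memories):
--         for tag in memory.get("tags", []):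
--             tag_to_memories[tag].add(i)
--
--     # 查找具有共同标签的记忆对
--     overlap_groups = defaultdict(list)
--     processed_groups = set()
--
--     # 对每对记忆计算标签重叠数
--     for i in range(len(memories)):
--         for j in range(i + 1, len(memories)):
--             tags_i = set(memories[i].get("tags", []))
--             tags_j = set(memories[j].get("tags", []))
--             overlap_count = len(tags_i & tags_j)
--
--             if overlap_count >= min_overlap:
--                 # 查找包含这两个记忆的最大组
--                 group = {i, j}
--
--                 # 扩展组，包含所有与组内记忆有足够重叠的记忆
--                 changed = True
--                 while changed:
--                     changed = False
--                     for k in range(len(memories)):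
--                         if k not in group:
--                             # 检查与组内所有记忆的最小重叠数
--                             min_overlap_with_group = min(
--                                 len(
--                                     set(memories[k].get("tags", []))
--                                     & set(memories[m].get("tags", []))
--                                 )
--                                 for m in group
--                             )
--                             if min_overlap_with_group >= min_overlap:
--                                 group.add(k)
--                                 changed = True
--
--                 # 将组转换为有序元组以便去重
--                 group_tuple = tuple(sorted(group))
--                 if group_tuple not in processed_groups:
--                     processed_groups.add(group_tuple)
--                     overlap_groups[min_overlap].append(set(group_tuple))
--
--     return overlap_groups
-- ===== SOURCE B (Python) =====
-- def _find_overlapping_memories(memories, min_overlap):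
--     n = len(memories)
--     tagsets = [set(m.get("tags", [])) for m in memories]
--     groups = []
--     seen = set()
--     for i in range(n):
--         si = tagsets[i]
--         for j in range(i + 1, n):
--             if len(si & tagsets[j]) < min_overlap:
--                 continue
--             # eligibility (overlapping every current member) only shrinks as the group
--             # grows, so one ascending sweep already reaches A's greedy fixpoint:
--             # no while-loop, no repeated passes, tag sets built once
--             group = [i, j]
--             for k in range(n):
--                 if k != i and k != j:
--                     sk = tagsets[k]
--                     if all(len(sk & tagsets[m]) >= min_overlap for m in group):
--                         group.append(k)
--             key = tuple(sorted(group))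
--             if key not in seen:
--                 seen.add(key)
--                 groups.append(set(key))
--     return {min_overlap: groups} if groups else {}
-- ===== Notes on version B (the rewrite author's own statement) =====
-- stated objective: alternative
-- what changed: B eliminates A's while-changed fixpoint loop entirely: since eligibility (overlapping every current group member) only shrinks as the group grows, one ascending sweep already reaches A's fixpoint; B also builds each memory's tag set once and short-circuits the per-candidate check with all(), where A rebuilds and intersects tag sets on every comparison and re-scans until no pass changes.
import Mathlib
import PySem

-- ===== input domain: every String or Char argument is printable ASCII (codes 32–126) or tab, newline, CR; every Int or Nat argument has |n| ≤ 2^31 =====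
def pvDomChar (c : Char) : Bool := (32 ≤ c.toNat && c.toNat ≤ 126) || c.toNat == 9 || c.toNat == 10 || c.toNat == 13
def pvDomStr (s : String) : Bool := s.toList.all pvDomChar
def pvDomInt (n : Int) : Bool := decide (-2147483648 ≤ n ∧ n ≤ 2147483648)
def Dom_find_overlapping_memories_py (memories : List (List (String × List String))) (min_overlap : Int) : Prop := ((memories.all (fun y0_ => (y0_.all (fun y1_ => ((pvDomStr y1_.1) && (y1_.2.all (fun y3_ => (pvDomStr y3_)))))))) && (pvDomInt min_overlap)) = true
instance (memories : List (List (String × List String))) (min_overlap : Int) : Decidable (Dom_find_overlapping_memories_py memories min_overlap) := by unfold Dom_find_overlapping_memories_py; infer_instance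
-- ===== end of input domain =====

-- ===== PORT A =====
-- B (the _alt port) replaces A's while-changed fixpoint expansion by a single ascending sweep
-- (eligibility only shrinks as the group grows) and counts overlaps on tag sets built once.

-- memory.get("tags", []) (shared by both Pythons verbatim)
def pyTags (mem : List (String × List String)) : List String :=
  (PySem.Dict.mk mem).getD "tags" []

-- set(memories[i].get("tags", [])) as A writes it inline (index always in range in A's loops)
def tagSetA (memories : List (List (String × List String))) (i : Int) : PySem.Set String :=
  PySem.Set.ofList (pyTags (PySem.List.pyGetD memories i []))

-- min(len(set(memories[k].get(..)) & set(memories[m].get(..))) for m in group); group is never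
-- empty where A calls min, so the default 0 of minD is unreachable
def minOverlapA (memories : List (List (String × List String))) (k : Int) (g : PySem.Set Int) : Int :=
  PySem.List.minD (g.map (fun m =>
    PySem.Set.len (PySem.Set.inter (tagSetA memories k) (tagSetA memories m)))) (fun x => x) 0

-- one execution of A's inner 'for k in range(len(memories))' body with changed reset to False
def passA (memories : List (List (String × List String))) (t n : Int) (g : PySem.Set Int) :
    PySem.Set Int × Bool :=
  (PySem.List.pyRange 0 n 1).foldl (fun gc k =>
    if PySem.Set.contains gc.1 k then gc
    else if minOverlapA memories k gc.1 >= t then (PySem.Set.add gc.1 k, true) else gc)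
    (g, false)

-- A's 'while changed' loop; each changed pass strictly grows the group inside {0..n-1}, so
-- fuel = memories.length + 1 passes always reach the fixed point
def expandA (memories : List (List (String × List String))) (t n : Int) :
    Nat → PySem.Set Int → PySem.Set Int
  | 0, g => g
  | fuel + 1, g =>
    let gc := passA memories t n g
    if gc.2 then expandA memories t n fuel gc.1 else gc.1

def find_overlapping_memories_py (memories : List (List (String × List String))) (min_overlap : Int) : List (Int × List (List Int)) :=
  -- tag_to_memories is built by A but never read afterwards (dead code, kept for fidelity)
  let _tag_to_memories : PySem.Dict String (PySem.Set Int) :=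
    (PySem.List.enumerate memories).foldl (fun d p =>
      (pyTags p.2).foldl (fun d tag =>
        d.modify tag PySem.Set.empty (fun s => PySem.Set.add s p.1)) d)
      PySem.Dict.empty
  let n := PySem.List.len memories
  let st := (PySem.List.pyRange 0 n 1).foldl (fun st i =>
    (PySem.List.pyRange (i + 1) n 1).foldl (fun st j =>
      let oc := PySem.Set.len (PySem.Set.inter (tagSetA memories i) (tagSetA memories j))
      if oc >= min_overlap then
        let g := expandA memories min_overlap n (memories.length + 1)
          (PySem.Set.add (PySem.Set.add PySem.Set.empty i) j)
        let gt := PySem.List.sorted g (fun x => x)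
        if PySem.Set.contains st.1 gt then st
        else (PySem.Set.add st.1 gt, st.2 ++ [PySem.Set.ofList gt])
      else st) st)
    ((PySem.Set.empty : PySem.Set (List Int)), ([] : List (List Int)))
  if st.2 = [] then [] else [(min_overlap, st.2)]

-- ===== PORT B =====
-- tagsets = [set(m.get("tags", [])) for m in memories]
def tagSetsB (memories : List (List (String × List String))) : List (PySem.Set String) :=
  memories.map (fun m => PySem.Set.ofList (pyTags m))

-- len(tagsets[a] & tagsets[b]) as B writes it inline; indices in range wherever B reads them
def ovB (ts : List (PySem.Set String)) (a b : Int) : Int :=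
  PySem.Set.len (PySem.Set.inter (PySem.List.pyGetD ts a []) (PySem.List.pyGetD ts b []))

-- the single ascending sweep: for k in range(n): if k not in (i, j) and all(...): group.append(k)
def sweepB (ts : List (PySem.Set String)) (t n i j : Int) : List Int :=
  (PySem.List.pyRange 0 n 1).foldl (fun group k =>
    if k ≠ i ∧ k ≠ j ∧ group.all (fun m => decide (ovB ts k m ≥ t)) then group ++ [k] else group)
    [i, j]

def find_overlapping_memories_py_alt (memories : List (List (String × List String))) (min_overlap : Int) : List (Int × List (List Int)) :=
  let n := PySem.List.len memories
  let ts := tagSetsB memories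
  let st := (PySem.List.pyRange 0 n 1).foldl (fun st i =>
    (PySem.List.pyRange (i + 1) n 1).foldl (fun st j =>
      if ovB ts i j < min_overlap then st
      else
        let gt := PySem.List.sorted (sweepB ts min_overlap n i j) (fun x => x)
        if PySem.Set.contains st.1 gt then st
        else (PySem.Set.add st.1 gt, st.2 ++ [PySem.Set.ofList gt])) st)
    ((PySem.Set.empty : PySem.Set (List Int)), ([] : List (List Int)))
  if st.2 = [] then [] else [(min_overlap, st.2)]

-- ===== PRECONDITION & SPEC =====
def Spec_find_overlapping_memories_py (memories : List (List (String × List String))) (min_overlap : Int) (out : List (Int × List (List Int))) : Prop := out = find_overlapping_memories_py_alt memories min_overlap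
instance (memories : List (List (String × List String))) (min_overlap : Int) (out : List (Int × List (List Int))) : Decidable (Spec_find_overlapping_memories_py memories min_overlap out) := by unfold Spec_find_overlapping_memories_py; infer_instance

-- ===== CLAIM (what is proved, stated in full; the proofs are below) =====
def Claim_equal_find_overlapping_memories_py : Prop := ∀ (memories : List (List (String × List String))) (min_overlap : Int), Dom_find_overlapping_memories_py memories min_overlap → Spec_find_overlapping_memories_py memories min_overlap (find_overlapping_memories_py memories min_overlap)

-- ===== LEMMAS AND PROOFS =====

-- the loop bodies of A's pass and B's sweep, named so the induction can speak about them
def stepA' (memories : List (List (String × List String))) (t : Int) :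
    PySem.Set Int × Bool → Int → PySem.Set Int × Bool := fun gc k =>
  if PySem.Set.contains gc.1 k then gc
  else if minOverlapA memories k gc.1 >= t then (PySem.Set.add gc.1 k, true) else gc

def stepB' (ts : List (PySem.Set String)) (t i j : Int) : List Int → Int → List Int :=
  fun group k =>
    if k ≠ i ∧ k ≠ j ∧ group.all (fun m => decide (ovB ts k m ≥ t)) then group ++ [k] else group

theorem passA_foldl (memories : List (List (String × List String))) (t n : Int) (g : PySem.Set Int) :
    passA memories t n g = (PySem.List.pyRange 0 n 1).foldl (stepA' memories t) (g, false) := rfl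

theorem sweepB_foldl (ts : List (PySem.Set String)) (t n i j : Int) :
    sweepB ts t n i j = (PySem.List.pyRange 0 n 1).foldl (stepB' ts t i j) [i, j] := rfl

-- all members of the group are valid indices
def BddI (n : Int) (g : List Int) : Prop := ∀ m ∈ g, 0 ≤ m ∧ m < n

theorem ts_get (memories : List (List (String × List String))) {a : Int}
    (h0 : 0 ≤ a) (h : a < (memories.length : Int)) :
    PySem.List.pyGetD (tagSetsB memories) a [] = tagSetA memories a := by
  unfold tagSetsB tagSetA
  rw [PySem.List.pyGetD_eq_getElem _ [] h0 (by simpa using h),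
      PySem.List.pyGetD_eq_getElem _ [] h0 h, List.getElem_map]

theorem ov_eq (memories : List (List (String × List String))) {a b : Int}
    (ha0 : 0 ≤ a) (ha : a < (memories.length : Int))
    (hb0 : 0 ≤ b) (hb : b < (memories.length : Int)) :
    PySem.Set.len (PySem.Set.inter (tagSetA memories a) (tagSetA memories b))
      = ovB (tagSetsB memories) a b := by
  unfold ovB
  rw [ts_get memories ha0 ha, ts_get memories hb0 hb]

theorem minD_ge_iff {l : List Int} (h : l ≠ []) (t : Int) :
    t ≤ PySem.List.minD l (fun x => x) 0 ↔ ∀ x ∈ l, t ≤ x := by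
  obtain ⟨m, hm⟩ : ∃ m, PySem.List.min? l (fun x => x) = some m := by
    cases hh : PySem.List.min? l (fun x => x) with
    | none => exact absurd ((PySem.List.min?_eq_none_iff l _).1 hh) h
    | some m => exact ⟨m, rfl⟩
  have hmem := PySem.List.min?_mem hm
  have hmin := PySem.List.min?_isMin hm
  simp only [PySem.List.minD, hm, Option.getD_some]
  exact ⟨fun ht x hx => le_trans ht (hmin x hx), fun hall => hall m hmem⟩

theorem minD_lt_of_mem {l : List Int} {x t : Int} (hx : x ∈ l) (h : x < t) :
    PySem.List.minD l (fun y => y) 0 < t := by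
  obtain ⟨m, hm⟩ : ∃ m, PySem.List.min? l (fun y => y) = some m := by
    cases hh : PySem.List.min? l (fun y => y) with
    | none => exact absurd ((PySem.List.min?_eq_none_iff l _).1 hh ▸ hx) (List.not_mem_nil)
    | some m => exact ⟨m, rfl⟩
  simp only [PySem.List.minD, hm, Option.getD_some]
  exact lt_of_le_of_lt (PySem.List.min?_isMin hm x hx) h

theorem minOverlapA_ge_iff (memories : List (List (String × List String))) {t k : Int}
    {g : List Int} (hg : g ≠ [])
    (hk0 : 0 ≤ k) (hk : k < (memories.length : Int)) (hb : BddI (memories.length : Int) g) :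
    minOverlapA memories k g ≥ t ↔ ∀ m ∈ g, ovB (tagSetsB memories) k m ≥ t := by
  unfold minOverlapA
  rw [ge_iff_le, minD_ge_iff (by simpa using hg)]
  constructor
  · intro h m hm
    have := h _ (List.mem_map_of_mem hm)
    rwa [ov_eq memories hk0 hk (hb m hm).1 (hb m hm).2] at this
  · intro h x hx
    obtain ⟨m, hm, rfl⟩ := List.mem_map.1 hx
    rw [ov_eq memories hk0 hk (hb m hm).1 (hb m hm).2]
    exact h m hm

-- one pass of A from a seed group = B's single sweep, together with the invariants of the
-- result group: it contains the seed, stays in range, and every skipped index has a witness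
-- member overlapping it below the threshold
theorem sweep_main (memories : List (List (String × List String))) (t i j : Int)
    (_hi0 : 0 ≤ i) (hij : i < j) (hjn : j < (memories.length : Int)) :
    ∀ (c : Nat) (s : Int), 0 ≤ s → ((memories.length : Int) - s).toNat = c →
    ∀ (g : List Int) (b : Bool),
      i ∈ g → j ∈ g → BddI (memories.length : Int) g →
      (∀ m ∈ g, m = i ∨ m = j ∨ m < s) →
      (((PySem.List.pyRange s (memories.length : Int) 1).foldl (stepA' memories t) (g, b)).1
          = (PySem.List.pyRange s (memories.length : Int) 1).foldl (stepB' (tagSetsB memories) t i j) g)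
      ∧ (∀ x ∈ g, x ∈ (PySem.List.pyRange s (memories.length : Int) 1).foldl (stepB' (tagSetsB memories) t i j) g)
      ∧ BddI (memories.length : Int) ((PySem.List.pyRange s (memories.length : Int) 1).foldl (stepB' (tagSetsB memories) t i j) g)
      ∧ (∀ k, s ≤ k → k < (memories.length : Int) →
           k ∉ (PySem.List.pyRange s (memories.length : Int) 1).foldl (stepB' (tagSetsB memories) t i j) g →
           ∃ m ∈ (PySem.List.pyRange s (memories.length : Int) 1).foldl (stepB' (tagSetsB memories) t i j) g,
             ovB (tagSetsB memories) k m < t) := by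
  intro c
  induction c with
  | zero =>
    intro s hs0 hc g b hig hjg hb hlt
    have hns : (memories.length : Int) ≤ s := by omega
    rw [PySem.List.pyRange_one_eq_nil hns]
    exact ⟨rfl, fun x hx => hx, hb, fun k hk1 hk2 _ => absurd (lt_of_le_of_lt hk1 hk2) (by omega)⟩
  | succ c ih =>
    intro s hs0 hc g b hig hjg hb hlt
    have hsn : s < (memories.length : Int) := by omega
    rw [PySem.List.pyRange_one_cons hsn, List.foldl_cons, List.foldl_cons]
    by_cases hsij : s = i ∨ s = j
    · -- s is a seed member: both sides skip it
      have hsg : s ∈ g := by rcases hsij with h | h <;> exact h ▸ (by assumption)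
      have hA : stepA' memories t (g, b) s = (g, b) := by
        simp [stepA', PySem.Set.contains, hsg]
      have hB : stepB' (tagSetsB memories) t i j g s = g := by
        have : ¬(s ≠ i ∧ s ≠ j ∧ g.all (fun m => decide (ovB (tagSetsB memories) s m ≥ t))) := by
          rcases hsij with h | h <;> simp [h]
        simp only [stepB']
        rw [if_neg this]
      rw [hA, hB]
      obtain ⟨e, sub, bd, fl⟩ := ih (s + 1) (by omega) (by omega) g b hig hjg hb
        (fun m hm => by rcases hlt m hm with h | h | h <;> [exact Or.inl h; exact Or.inr (Or.inl h); exact Or.inr (Or.inr (by omega))])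
      refine ⟨e, sub, bd, fun k hk1 hk2 hkn => ?_⟩
      by_cases hks : k = s
      · exact absurd (hks ▸ sub s hsg) hkn
      · exact fl k (by omega) hk2 hkn
    · push Not at hsij
      have hsg : s ∉ g := by
        intro hmem
        rcases hlt s hmem with h | h | h
        · exact hsij.1 h
        · exact hsij.2 h
        · omega
      have hgne : g ≠ [] := List.ne_nil_of_mem hig
      have hcontains : PySem.Set.contains g s = false := by
        simp [PySem.Set.contains, hsg]
      have hiff := minOverlapA_ge_iff memories (t := t) (k := s) hgne hs0 hsn hb
      by_cases hall : ∀ m ∈ g, ovB (tagSetsB memories) s m ≥ t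
      · -- eligible: both sides append s
        have hA : stepA' memories t (g, b) s = (g ++ [s], true) := by
          have h2 : minOverlapA memories s g ≥ t := hiff.2 hall
          simp [stepA', h2, PySem.Set.add, PySem.Set.contains, hsg]
        have hB : stepB' (tagSetsB memories) t i j g s = g ++ [s] := by
          have : s ≠ i ∧ s ≠ j ∧ g.all (fun m => decide (ovB (tagSetsB memories) s m ≥ t)) :=
            ⟨hsij.1, hsij.2, by simpa [List.all_eq_true] using hall⟩
          simp only [stepB']
          rw [if_pos this]
        rw [hA, hB]
        obtain ⟨e, sub, bd, fl⟩ := ih (s + 1) (by omega) (by omega) (g ++ [s]) true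
          (List.mem_append_left _ hig) (List.mem_append_left _ hjg)
          (fun m hm => by
            rcases List.mem_append.1 hm with h | h
            · exact hb m h
            · simp at h; omega)
          (fun m hm => by
            rcases List.mem_append.1 hm with h | h
            · rcases hlt m h with h' | h' | h' <;> [exact Or.inl h'; exact Or.inr (Or.inl h'); exact Or.inr (Or.inr (by omega))]
            · simp at h; omega)
        refine ⟨e, fun x hx => sub x (List.mem_append_left _ hx), bd, fun k hk1 hk2 hkn => ?_⟩
        by_cases hks : k = s
        · exact absurd (hks ▸ sub s (List.mem_append_right _ (by simp))) hkn
        · exact fl k (by omega) hk2 hkn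
      · -- ineligible: both sides keep g, and some member witnesses the failure
        have hA : stepA' memories t (g, b) s = (g, b) := by
          have h2 : ¬ minOverlapA memories s g ≥ t := fun hge => hall (hiff.1 hge)
          simp [stepA', h2, PySem.Set.contains, hsg]
        have hB : stepB' (tagSetsB memories) t i j g s = g := by
          have : ¬(s ≠ i ∧ s ≠ j ∧ g.all (fun m => decide (ovB (tagSetsB memories) s m ≥ t))) := by
            intro ⟨_, _, h3⟩
            exact hall (by simpa [List.all_eq_true] using h3)
          simp only [stepB']
          rw [if_neg this]
        rw [hA, hB]
        obtain ⟨e, sub, bd, fl⟩ := ih (s + 1) (by omega) (by omega) g b hig hjg hb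
          (fun m hm => by rcases hlt m hm with h | h | h <;> [exact Or.inl h; exact Or.inr (Or.inl h); exact Or.inr (Or.inr (by omega))])
        refine ⟨e, sub, bd, fun k hk1 hk2 hkn => ?_⟩
        by_cases hks : k = s
        · push Not at hall
          obtain ⟨m, hm, hlt'⟩ := hall
          exact ⟨m, sub m hm, by rw [hks]; omega⟩
        · exact fl k (by omega) hk2 hkn

-- A's pass is the identity on a group every outside index fails against
theorem pass_fix (memories : List (List (String × List String))) (t : Int) (G : List Int)
    (hb : BddI (memories.length : Int) G)
    (hfail : ∀ k, 0 ≤ k → k < (memories.length : Int) → k ∉ G →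
      ∃ m ∈ G, ovB (tagSetsB memories) k m < t) :
    ∀ (c : Nat) (s : Int), 0 ≤ s → ((memories.length : Int) - s).toNat = c →
      (PySem.List.pyRange s (memories.length : Int) 1).foldl (stepA' memories t) (G, false)
        = (G, false) := by
  intro c
  induction c with
  | zero =>
    intro s hs0 hc
    rw [PySem.List.pyRange_one_eq_nil (by omega)]
    rfl
  | succ c ih =>
    intro s hs0 hc
    have hsn : s < (memories.length : Int) := by omega
    rw [PySem.List.pyRange_one_cons hsn, List.foldl_cons]
    by_cases hm : s ∈ G
    · have hA : stepA' memories t (G, false) s = (G, false) := by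
        simp [stepA', PySem.Set.contains, hm]
      rw [hA]; exact ih (s + 1) (by omega) (by omega)
    · obtain ⟨m, hmG, hlt⟩ := hfail s hs0 hsn hm
      have hmo : minOverlapA memories s G < t := by
        unfold minOverlapA
        apply minD_lt_of_mem (x := PySem.Set.len
          (PySem.Set.inter (tagSetA memories s) (tagSetA memories m)))
        · exact List.mem_map_of_mem hmG
        · rw [ov_eq memories hs0 hsn (hb m hmG).1 (hb m hmG).2]; exact hlt
      have hA : stepA' memories t (G, false) s = (G, false) := by
        simp [stepA', PySem.Set.contains, hm, not_le.2 hmo]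
      rw [hA]; exact ih (s + 1) (by omega) (by omega)

-- A's fuelled while-loop from seed {i, j} computes exactly B's single sweep
theorem expand_eq (memories : List (List (String × List String))) (t i j : Int)
    (hi0 : 0 ≤ i) (hij : i < j) (hjn : j < (memories.length : Int)) :
    expandA memories t (memories.length : Int) (memories.length + 1)
        (PySem.Set.add (PySem.Set.add PySem.Set.empty i) j)
      = sweepB (tagSetsB memories) t (memories.length : Int) i j := by
  have hne : j ≠ i := by omega
  have hseed : PySem.Set.add (PySem.Set.add PySem.Set.empty i) j = [i, j] := by
    simp [PySem.Set.add, PySem.Set.empty, PySem.Set.contains, hne]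
  have hmain := sweep_main memories t i j hi0 hij hjn
    ((memories.length : Int) - 0).toNat 0 le_rfl rfl [i, j] false (by simp) (by simp)
    (fun m hm => by rcases List.mem_pair.1 hm with h | h <;> omega)
    (fun m hm => by rcases List.mem_pair.1 hm with h | h <;> [exact Or.inl h; exact Or.inr (Or.inl h)])
  obtain ⟨heq, hsub, hbd, hfl⟩ := hmain
  set G := (PySem.List.pyRange 0 (memories.length : Int) 1).foldl
    (stepB' (tagSetsB memories) t i j) [i, j] with hG
  have hfix : passA memories t (memories.length : Int) G = (G, false) := by
    rw [passA_foldl]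
    exact pass_fix memories t G hbd (fun k h0 h1 => hfl k h0 h1)
      ((memories.length : Int) - 0).toNat 0 le_rfl rfl
  have hL2 : 2 ≤ memories.length := by omega
  obtain ⟨c1, hc1⟩ : ∃ c, memories.length + 1 = c + 2 := ⟨memories.length - 1, by omega⟩
  rw [hc1, hseed, sweepB_foldl, ← hG]
  show expandA memories t (memories.length : Int) (c1 + 1 + 1) [i, j] = G
  rw [expandA]
  have hp1 : passA memories t (memories.length : Int) [i, j]
      = (PySem.List.pyRange 0 (memories.length : Int) 1).foldl (stepA' memories t) ([i, j], false) :=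
    passA_foldl ..
  by_cases hflag : (passA memories t (memories.length : Int) [i, j]).2
  · simp only [hflag, if_true]
    have h1 : (passA memories t (memories.length : Int) [i, j]).1 = G := by
      rw [hp1]; exact heq
    rw [h1, expandA, hfix]
    simp
  · simp only [hflag, if_false, Bool.false_eq_true]
    rw [hp1]; exact heq

theorem main_eq (memories : List (List (String × List String))) (min_overlap : Int) :
    find_overlapping_memories_py memories min_overlap
      = find_overlapping_memories_py_alt memories min_overlap := by
  unfold find_overlapping_memories_py find_overlapping_memories_py_alt
  simp only [PySem.List.len_eq]
  refine congrArg (fun st : PySem.Set (List Int) × List (List Int) =>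
    if st.2 = [] then ([] : List (Int × List (List Int))) else [(min_overlap, st.2)]) ?_
  apply PySem.List.foldl_congr_mem
  intro st i hi
  obtain ⟨hi0, hin⟩ := PySem.List.mem_pyRange_one.1 hi
  apply PySem.List.foldl_congr_mem
  intro st j hj
  obtain ⟨hj1, hjn⟩ := PySem.List.mem_pyRange_one.1 hj
  have hij : i < j := by omega
  rw [ov_eq memories hi0 hin (by omega) hjn,
      expand_eq memories min_overlap i j hi0 hij hjn]
  by_cases h : ovB (tagSetsB memories) i j < min_overlap
  · rw [if_neg (by omega), if_pos h]
  · rw [if_pos (by omega), if_neg h]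

-- ===== VERDICT (by name: the statement is the Claim_ definition above) =====
theorem find_overlapping_memories_py_spec : Claim_equal_find_overlapping_memories_py := by
  intro memories min_overlap _
  unfold Spec_find_overlapping_memories_py
  exact main_eq memories min_overlap
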